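-- pv_equiv track=rewrite | github.com/MrBrantCode/unitest_baseline | mut_generate/mist_train_cf/cf_68749/solution.py | mutate_case_and_evolve_symbols
-- ===== SOURCE A (Python) =====
-- def mutate_case_and_evolve_symbols(string: str) -> str:
--     result = ''
--     for char in string:
--         if char.isalpha():
--             if char.islower():
--                 result += char.upper()
--             else:
--                 result += char.lower()
--         elif char.isdigit():
--             if int(char) % 2 != 0:
--                 result += str(int(char) + 1)
--             else:
--                 result += char
--         elif char in '!@#$%^&*()':
--             result += char * 2
--         else:
--             result += char
--     return result
-- ===== SOURCE B (Python) =====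
-- def mutate_case_and_evolve_symbols(string: str) -> str:
--     # Build a translation table once (one entry per distinct character),
--     # then apply it in a single translate pass.
--     table = {}
--     for char in set(string):
--         if char.isalpha():
--             table[ord(char)] = char.upper() if char.islower() else char.lower()
--         elif char.isdigit():
--             n = int(char)
--             table[ord(char)] = str(n + 1) if n % 2 != 0 else char
--         elif char in '!@#$%^&*()':
--             table[ord(char)] = char * 2
--         else:
--             table[ord(char)] = char
--     return string.translate(table)
-- ===== Notes on version B (the rewrite author's own statement) =====
-- stated objective: faster
-- what changed: B precomputes one replacement per distinct character into a translation table (dict keyed by ord) and applies it with a single str.translate pass, instead of A's per-character Python branch chain with string concatenation in the loop.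
import Mathlib
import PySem

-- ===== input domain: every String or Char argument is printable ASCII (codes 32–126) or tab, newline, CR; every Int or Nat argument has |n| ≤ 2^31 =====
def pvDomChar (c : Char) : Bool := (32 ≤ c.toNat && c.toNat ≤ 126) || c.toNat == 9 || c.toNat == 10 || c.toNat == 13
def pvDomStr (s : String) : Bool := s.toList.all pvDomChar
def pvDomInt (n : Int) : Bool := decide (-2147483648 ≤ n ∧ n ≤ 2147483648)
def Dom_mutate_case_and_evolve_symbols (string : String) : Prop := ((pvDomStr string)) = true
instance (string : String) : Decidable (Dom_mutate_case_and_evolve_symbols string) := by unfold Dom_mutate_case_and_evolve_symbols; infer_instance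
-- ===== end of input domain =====

-- B builds a translation table (one entry per distinct character) and maps through it; A branches per character.

-- ===== PORT A =====
-- int(char) is exact via PySem.Int.ofChars?; on ASCII every isdigit char converts, so the
-- `.getD 0` default (Python's ValueError, outside the ASCII domain) is unreachable here.
def mutate_case_and_evolve_symbols (string : String) : String :=
  String.ofList <| string.toList.foldl (fun result char =>
    if PySem.Chars.isalpha char then
      if PySem.Chars.islower char then result ++ [PySem.Chars.upperChar char]
      else result ++ [PySem.Chars.lowerChar char]
    else if PySem.Chars.isdigit char then
      if ((PySem.Int.ofChars? [char]).getD 0) % 2 != 0 then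
        result ++ PySem.Int.toChars ((PySem.Int.ofChars? [char]).getD 0 + 1)
      else result ++ [char]
    else if PySem.Chars.isIn [char] "!@#$%^&*()".toList then
      result ++ PySem.List.pyRepeat [char] 2
    else result ++ [char]) []

-- ===== PORT B =====
-- the translation table: dict keyed by ord(char), built over the distinct characters
def pvTable (string : String) : PySem.Dict Int (List Char) :=
  (PySem.Set.ofList string.toList).foldl (fun table char =>
    table.insert (char.toNat : Int)
      (if PySem.Chars.isalpha char then
        if PySem.Chars.islower char then [PySem.Chars.upperChar char]
        else [PySem.Chars.lowerChar char]
      else if PySem.Chars.isdigit char then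
        if ((PySem.Int.ofChars? [char]).getD 0) % 2 != 0 then
          PySem.Int.toChars ((PySem.Int.ofChars? [char]).getD 0 + 1)
        else [char]
      else if PySem.Chars.isIn [char] "!@#$%^&*()".toList then
        PySem.List.pyRepeat [char] 2
      else [char])) PySem.Dict.empty

-- str.translate: each char is replaced by its table entry, kept unchanged if absent
def mutate_case_and_evolve_symbols_alt (string : String) : String :=
  String.ofList <| string.toList.flatMap (fun char =>
    ((pvTable string).get? (char.toNat : Int)).getD [char])

-- ===== PRECONDITION & SPEC =====
def Spec_mutate_case_and_evolve_symbols (string : String) (out : String) : Prop := out = mutate_case_and_evolve_symbols_alt string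
instance (string : String) (out : String) : Decidable (Spec_mutate_case_and_evolve_symbols string out) := by unfold Spec_mutate_case_and_evolve_symbols; infer_instance

-- ===== CLAIM (what is proved, stated in full; the proofs are below) =====
def Claim_equal_mutate_case_and_evolve_symbols : Prop := ∀ (string : String), Dom_mutate_case_and_evolve_symbols string → Spec_mutate_case_and_evolve_symbols string (mutate_case_and_evolve_symbols string)

-- ===== LEMMAS AND PROOFS =====

-- the per-character rule both ports implement
def pvRepl (char : Char) : List Char :=
  if PySem.Chars.isalpha char then
    if PySem.Chars.islower char then [PySem.Chars.upperChar char]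
    else [PySem.Chars.lowerChar char]
  else if PySem.Chars.isdigit char then
    if ((PySem.Int.ofChars? [char]).getD 0) % 2 != 0 then
      PySem.Int.toChars ((PySem.Int.ofChars? [char]).getD 0 + 1)
    else [char]
  else if PySem.Chars.isIn [char] "!@#$%^&*()".toList then
    PySem.List.pyRepeat [char] 2
  else [char]

theorem pvA_eq_flatMap (s : String) :
    mutate_case_and_evolve_symbols s = String.ofList (s.toList.flatMap pvRepl) := by
  unfold mutate_case_and_evolve_symbols
  congr 1
  have h : (fun (result : List Char) (char : Char) =>
      if PySem.Chars.isalpha char then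
        if PySem.Chars.islower char then result ++ [PySem.Chars.upperChar char]
        else result ++ [PySem.Chars.lowerChar char]
      else if PySem.Chars.isdigit char then
        if ((PySem.Int.ofChars? [char]).getD 0) % 2 != 0 then
          result ++ PySem.Int.toChars ((PySem.Int.ofChars? [char]).getD 0 + 1)
        else result ++ [char]
      else if PySem.Chars.isIn [char] "!@#$%^&*()".toList then
        result ++ PySem.List.pyRepeat [char] 2
      else result ++ [char]) = fun result char => result ++ pvRepl char := by
    funext result char
    unfold pvRepl
    split_ifs <;> rfl
  rw [h, PySem.List.foldl_append_eq_flatMap]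
  simp

theorem pvTable_untouched (l : List Char) (d : PySem.Dict Int (List Char)) (x : Char)
    (hx : x ∉ l) :
    (l.foldl (fun t c => t.insert (c.toNat : Int) (pvRepl c)) d).get? (x.toNat : Int)
      = d.get? (x.toNat : Int) := by
  induction l generalizing d with
  | nil => rfl
  | cons c t ih =>
    simp only [List.foldl_cons]
    rw [ih _ (by simp at hx; exact hx.2)]
    apply PySem.Dict.get?_insert_of_ne
    intro h
    have : c = x := by
      have h1 : c.toNat = x.toNat := by exact_mod_cast h.symm
      exact Char.ext (UInt32.toNat_inj.mp h1)
    simp [this] at hx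

theorem pvTable_get (l : List Char) (d : PySem.Dict Int (List Char)) (x : Char)
    (hx : x ∈ l) :
    (l.foldl (fun t c => t.insert (c.toNat : Int) (pvRepl c)) d).get? (x.toNat : Int)
      = some (pvRepl x) := by
  induction l generalizing d with
  | nil => cases hx
  | cons c t ih =>
    simp only [List.foldl_cons]
    by_cases hxt : x ∈ t
    · exact ih _ hxt
    · have hxc : x = c := by
        rcases List.mem_cons.mp hx with h | h
        · exact h
        · exact absurd h hxt
      subst hxc
      rw [pvTable_untouched t _ x hxt]
      simp [PySem.Dict.get?_insert_self]

theorem pvTable_spec (s : String) (x : Char) (hx : x ∈ s.toList) :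
    (pvTable s).get? (x.toNat : Int) = some (pvRepl x) := by
  unfold pvTable
  have hmem : x ∈ PySem.Set.ofList s.toList := (PySem.Set.mem_ofList _ _).mpr hx
  have h : (fun (table : PySem.Dict Int (List Char)) (char : Char) =>
      table.insert (char.toNat : Int)
        (if PySem.Chars.isalpha char then
          if PySem.Chars.islower char then [PySem.Chars.upperChar char]
          else [PySem.Chars.lowerChar char]
        else if PySem.Chars.isdigit char then
          if ((PySem.Int.ofChars? [char]).getD 0) % 2 != 0 then
            PySem.Int.toChars ((PySem.Int.ofChars? [char]).getD 0 + 1)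
          else [char]
        else if PySem.Chars.isIn [char] "!@#$%^&*()".toList then
          PySem.List.pyRepeat [char] 2
        else [char])) = fun t c => t.insert (c.toNat : Int) (pvRepl c) := by
    funext t c; unfold pvRepl; split_ifs <;> rfl
  rw [h]
  exact pvTable_get _ _ _ hmem

theorem pvB_eq_flatMap (s : String) :
    mutate_case_and_evolve_symbols_alt s = String.ofList (s.toList.flatMap pvRepl) := by
  unfold mutate_case_and_evolve_symbols_alt
  congr 1
  apply List.flatMap_congr
  intro x hx
  rw [pvTable_spec s x hx]
  rfl

-- ===== VERDICT (by name: the statement is the Claim_ definition above) =====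
theorem mutate_case_and_evolve_symbols_spec : Claim_equal_mutate_case_and_evolve_symbols := by
  intro s _
  unfold Spec_mutate_case_and_evolve_symbols
  rw [pvA_eq_flatMap, pvB_eq_flatMap]
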